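-- pv_equiv track=rewrite | github.com/Harjacober/CodeforcesSolvedProblems | BadPrices.py | badPrices
-- ===== SOURCE A (Python) =====
-- def badPrices(n, days):
--     smallest = days[-1]
--     count = 0
--     for i in range(n-2,-1,-1):
--         if days[i] > smallest:
--             count += 1
--         else:
--             smallest = days[i]
--     return count
-- ===== SOURCE B (Python) =====
-- def badPrices(n, days):
--     seed = days[-1]
--     prefix = days[:max(n - 1, 0)]
--     sufmins = []
--     cur = seed
--     for d in reversed(prefix):
--         sufmins.append(cur)
--         cur = min(cur, d)
--     sufmins.reverse()
--     return sum(1 for d, s in zip(prefix, sufmins) if d > s)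
-- ===== Notes on version B (the rewrite author's own statement) =====
-- stated objective: alternative
-- what changed: Replaced A's single backward scan that carries a running minimum and counts on the fly by a two-phase decomposition: precompute the list of suffix minima (seeded with days[-1]) over the prefix days[:n-1], then count positions whose price exceeds their suffix minimum via zip.
import Mathlib
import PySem

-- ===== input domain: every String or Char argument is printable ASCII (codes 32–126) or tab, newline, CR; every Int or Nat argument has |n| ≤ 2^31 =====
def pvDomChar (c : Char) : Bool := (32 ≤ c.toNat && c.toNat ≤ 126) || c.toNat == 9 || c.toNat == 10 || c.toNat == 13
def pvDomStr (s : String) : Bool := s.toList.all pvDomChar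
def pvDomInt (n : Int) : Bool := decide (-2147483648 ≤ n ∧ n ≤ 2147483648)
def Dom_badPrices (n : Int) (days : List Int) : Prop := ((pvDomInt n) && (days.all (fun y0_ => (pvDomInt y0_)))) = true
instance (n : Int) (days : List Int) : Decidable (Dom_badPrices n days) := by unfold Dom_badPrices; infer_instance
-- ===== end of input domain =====

-- B replaces A's single backward scan carrying a running minimum by a suffix-minimum
-- precompute followed by a zip-and-count pass (alternative decomposition, same cost).

-- ===== PORT A =====
def badPrices (n : Int) (days : List Int) : Int :=
  match PySem.List.pyGet? days (-1) with
  | none => 0   -- IndexError on empty days; excluded by Pre_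
  | some smallest0 =>
    -- for i in range(n-2,-1,-1): if days[i] > smallest: count += 1 else: smallest = days[i]
    ((PySem.List.pyRange (n - 2) (-1) (-1)).foldl
      (fun (st : Int × Int) i =>
        if PySem.List.pyGetD days i 0 > st.1 then (st.1, st.2 + 1)
        else (PySem.List.pyGetD days i 0, st.2))   -- pyGetD exact under Pre_ (index in range)
      (smallest0, 0)).2

-- ===== PORT B =====
def badPrices_alt (n : Int) (days : List Int) : Int :=
  match PySem.List.pyGet? days (-1) with
  | none => 0   -- IndexError on empty days; excluded by Pre_
  | some seed =>
    let pref := PySem.List.slice days none (some (max (n - 1) 0))   -- days[:max(n-1,0)]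
    -- for d in reversed(pref): sufmins.append(cur); cur = min(cur, d)
    let st := pref.reverse.foldl
      (fun (st : Int × List Int) d => (min st.1 d, st.2 ++ [st.1])) (seed, ([] : List Int))
    let sufmins := st.2.reverse
    -- sum(1 for d, s in zip(pref, sufmins) if d > s)
    (pref.zip sufmins).foldl (fun (c : Int) p => if p.1 > p.2 then c + 1 else c) 0

-- ===== PRECONDITION & SPEC =====
-- Pre_ excludes exactly the inputs where A raises IndexError: empty days (days[-1]),
-- and n ≥ len(days)+2 (the loop reads days[n-2] past the end).
def Pre_badPrices (n : Int) (days : List Int) : Prop :=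
  days ≠ [] ∧ n ≤ (days.length : Int) + 1
instance (n : Int) (days : List Int) : Decidable (Pre_badPrices n days) := by
  unfold Pre_badPrices; infer_instance
def pvWitness_badPrices : Int × List Int := (3, [3, 1, 2])

def Spec_badPrices (n : Int) (days : List Int) (out : Int) : Prop := out = badPrices_alt n days
instance (n : Int) (days : List Int) (out : Int) : Decidable (Spec_badPrices n days out) := by
  unfold Spec_badPrices; infer_instance

-- ===== CLAIM (what is proved, stated in full; the proofs are below) =====
def Claim_equal_badPrices : Prop := ∀ (n : Int) (days : List Int), Dom_badPrices n days → Pre_badPrices n days → Spec_badPrices n days (badPrices n days)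

-- ===== LEMMAS AND PROOFS =====

/-- Running minima seen *before* each element of `l`, seeded with `s`. -/
def runmins : Int → List Int → List Int
  | _, [] => []
  | s, d :: l => s :: runmins (min s d) l

theorem length_runmins : ∀ (l : List Int) (s : Int), (runmins s l).length = l.length
  | [], _ => rfl
  | _ :: l, s => by simp [runmins, length_runmins l]

theorem bfold_snd : ∀ (l : List Int) (s : Int) (acc : List Int),
    (l.foldl (fun (st : Int × List Int) d => (min st.1 d, st.2 ++ [st.1])) (s, acc)).2
      = acc ++ runmins s l
  | [], s, acc => by simp [runmins]
  | d :: l, s, acc => by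
    simp only [List.foldl_cons, runmins]
    rw [bfold_snd l (min s d) (acc ++ [s])]
    simp

theorem afold_count : ∀ (l : List Int) (s c : Int),
    (l.foldl (fun (st : Int × Int) d =>
        if d > st.1 then (st.1, st.2 + 1) else (d, st.2)) (s, c)).2
      = c + ((l.zip (runmins s l)).countP (fun p => decide (p.1 > p.2)))
  | [], s, c => by simp [runmins]
  | d :: l, s, c => by
    simp only [List.foldl_cons, runmins, List.zip_cons_cons, List.countP_cons]
    by_cases h : d > s
    · have hmin : min s d = s := by omega
      rw [if_pos h, afold_count l s (c + 1), hmin]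
      simp [h]; ring
    · have hmin : min s d = d := by omega
      rw [if_neg h, afold_count l d c, hmin]
      simp [h]

theorem count_fold : ∀ (L : List (Int × Int)) (c : Int),
    L.foldl (fun (c : Int) p => if p.1 > p.2 then c + 1 else c) c
      = c + (L.countP (fun p => decide (p.1 > p.2)))
  | [], c => by simp
  | p :: L, c => by
    simp only [List.foldl_cons, List.countP_cons]
    by_cases h : p.1 > p.2
    · rw [if_pos h, count_fold L (c + 1)]; simp [h]; ring
    · rw [if_neg h, count_fold L c]; simp [h]

theorem zip_rev {α β : Type} : ∀ (a : List α) (b : List β), a.length = b.length →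
    a.reverse.zip b.reverse = (a.zip b).reverse
  | [], [], _ => rfl
  | [], _ :: _, h => by simp at h
  | _ :: _, [], h => by simp at h
  | x :: a, y :: b, h => by
    have hlen : a.length = b.length := by simpa using h
    simp only [List.reverse_cons, List.zip_cons_cons]
    rw [List.zip_append (by simpa using hlen), zip_rev a b hlen]
    simp

/-- A's indexed countdown fold equals a fold over the reversed pref. -/
theorem fold_idx {σ : Type} (days : List Int) (g : σ → Int → σ) :
    ∀ (m : Nat), m ≤ days.length → ∀ (init : σ),
    (List.range m).foldl (fun st (k : Nat) => g st (PySem.List.pyGetD days ((m : Int) - 1 - (k : Int)) 0)) init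
      = ((days.take m).reverse).foldl g init
  | 0, _, init => by simp
  | m + 1, hm, init => by
    have hlt : m < days.length := by omega
    rw [List.range_succ_eq_map, List.foldl_cons, List.foldl_map]
    have hfun : (fun (st : σ) (k : Nat) =>
          g st (PySem.List.pyGetD days ((↑(m + 1) : Int) - 1 - ↑(k + 1)) 0))
        = (fun (st : σ) (k : Nat) => g st (PySem.List.pyGetD days ((m : Int) - 1 - k) 0)) := by
      funext st k
      congr 2
      push_cast; ring
    have hidx : ((↑(m + 1) : Int) - 1 - (0 : Nat)) = ((m : Nat) : Int) := by push_cast; ring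
    rw [hidx, PySem.List.pyGetD_natCast, List.getD_eq_getElem days 0 hlt, hfun,
      fold_idx days g m (by omega)]
    have htake : List.take (m + 1) days = List.take m days ++ [days[m]] := by
      rw [List.take_add_one, List.getElem?_eq_getElem hlt]; rfl
    rw [htake, List.reverse_append]
    simp

theorem take_pref_eq (n : Int) (days : List Int) :
    PySem.List.slice days none (some (max (n - 1) 0)) = days.take (n - 1).toNat := by
  rw [PySem.List.slice_to days (le_max_right _ _)]
  congr 1
  omega

-- ===== VERDICT (by name: the statement is the Claim_ definition above) =====
theorem badPrices_spec : Claim_equal_badPrices := by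
  intro n days _dom hpre
  obtain ⟨hne, hlen⟩ := hpre
  unfold Spec_badPrices badPrices badPrices_alt
  cases hget : PySem.List.pyGet? days (-1) with
  | none => rfl
  | some seed =>
    simp only [hget]
    set m : Nat := (n - 1).toNat with hm
    have hmle : m ≤ days.length := by omega
    rw [take_pref_eq n days, ← hm, PySem.List.pyRange_neg_one]
    have hrange : ((n - 2) - (-1)).toNat = m := by omega
    rw [hrange, List.foldl_map]
    set l : List Int := (days.take m).reverse with hl
    -- B side: suffix minima then zip-count
    rw [bfold_snd l seed [], List.nil_append, count_fold, zero_add]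
    have hz : (days.take m).zip ((runmins seed l).reverse)
        = (l.zip (runmins seed l)).reverse := by
      have h := zip_rev l (runmins seed l) (length_runmins l seed).symm
      rw [hl, List.reverse_reverse] at h
      rw [hl, h]
    rw [hz, List.countP_reverse]
    -- A side: indexed countdown fold
    by_cases hn : 1 ≤ n
    · have hidx : (n - 2 : Int) = (m : Int) - 1 := by omega
      simp only [hidx]
      rw [fold_idx days
        (fun (st : Int × Int) d => if d > st.1 then (st.1, st.2 + 1) else (d, st.2))
        m hmle (seed, 0), ← hl, afold_count l seed 0, zero_add]
    · have hm0 : m = 0 := by omega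
      simp [hm0, hl, runmins]
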